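-- pv_equiv track=rewrite | github.com/sirin/seggen | draft/inspyred_sample.py | get_segments_from_individual
-- ===== SOURCE A (Python) =====
-- def fill_sentences_list(all_sentences,sentence):
--     all_sentences.append(sentence)
--     return all_sentences
--
-- def get_segments_from_individual(individual, sentences):
--     temp = []
--     segments = []
--     for i, j in zip(individual,range(len(sentences))):
--         temp.append(sentences[j])
--         if i == 1:
--             fill_sentences_list(segments,temp)
--             temp = []
--     if len(sentences) == len(individual)+1:
--         temp.append(sentences[-1])
--         fill_sentences_list(segments,temp)
--         temp = []
--     return segments
-- ===== SOURCE B (Python) =====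
-- def get_segments_from_individual(individual, sentences):
--     # Boundary-index pass: collect cut positions, then slice sentences between them.
--     n = min(len(individual), len(sentences))
--     boundaries = [i for i in range(n) if individual[i] == 1]
--     segments = []
--     start = 0
--     for b in boundaries:
--         segments.append(sentences[start:b + 1])
--         start = b + 1
--     if len(sentences) == len(individual) + 1:
--         segments.append(sentences[start:])
--     return segments
-- ===== Notes on version B (the rewrite author's own statement) =====
-- stated objective: alternative
-- what changed: Replaces the running temp-list accumulation inside a zip loop with a two-phase decomposition: first collect the boundary indices where individual[i]==1, then build each segment as a slice of sentences between consecutive boundaries (plus the tail slice in the len(sentences)==len(individual)+1 case).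
import Mathlib
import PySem

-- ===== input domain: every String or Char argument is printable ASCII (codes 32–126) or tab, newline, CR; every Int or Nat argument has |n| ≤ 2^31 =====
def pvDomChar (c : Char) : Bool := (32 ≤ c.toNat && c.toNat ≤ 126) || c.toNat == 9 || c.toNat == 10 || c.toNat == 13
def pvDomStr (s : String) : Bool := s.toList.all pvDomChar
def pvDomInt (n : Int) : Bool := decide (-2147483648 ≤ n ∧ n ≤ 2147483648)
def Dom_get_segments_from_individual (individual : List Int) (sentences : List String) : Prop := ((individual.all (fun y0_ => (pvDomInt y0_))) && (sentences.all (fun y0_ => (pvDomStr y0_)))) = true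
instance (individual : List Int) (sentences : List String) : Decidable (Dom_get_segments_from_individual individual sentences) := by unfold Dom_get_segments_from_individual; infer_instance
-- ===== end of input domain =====

-- B replaces A's running temp-list accumulation with boundary-index collection followed by slicing; same cost, different decomposition.

-- ===== PORT A =====
-- literal port of A: fold over zip(individual, range(len(sentences))) carrying (temp, segments)
def get_segments_from_individual (individual : List Int) (sentences : List String) : List (List String) :=
  let st := (individual.zip (PySem.List.pyRange 0 sentences.length 1)).foldl
    (fun (st : List String × List (List String)) ij =>
      let temp := st.1 ++ [PySem.List.pyGetD sentences ij.2 ""]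
      if ij.1 == 1 then ([], st.2 ++ [temp]) else (temp, st.2))
    ([], [])
  if sentences.length == individual.length + 1 then
    st.2 ++ [st.1 ++ [PySem.List.pyGetD sentences (-1) ""]]
  else st.2

-- ===== PORT B =====
-- literal port of Source B: boundary indices first, then slice-based segment building
def get_segments_from_individual_alt (individual : List Int) (sentences : List String) : List (List String) :=
  let n := min individual.length sentences.length
  let boundaries := (PySem.List.pyRange 0 n 1).filter (fun i => PySem.List.pyGetD individual i 0 == 1)
  let st := boundaries.foldl
    (fun (st : Int × List (List String)) b =>
      (b + 1, st.2 ++ [PySem.List.slice sentences (some st.1) (some (b + 1))]))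
    ((0 : Int), ([] : List (List String)))
  if sentences.length == individual.length + 1 then
    st.2 ++ [PySem.List.slice sentences (some st.1) none]
  else st.2

-- ===== PRECONDITION & SPEC =====
def Spec_get_segments_from_individual (individual : List Int) (sentences : List String) (out : List (List String)) : Prop := out = get_segments_from_individual_alt individual sentences
instance (individual : List Int) (sentences : List String) (out : List (List String)) : Decidable (Spec_get_segments_from_individual individual sentences out) := by unfold Spec_get_segments_from_individual; infer_instance

-- ===== CLAIM (what is proved, stated in full; the proofs are below) =====
def Claim_equal_get_segments_from_individual : Prop := ∀ (individual : List Int) (sentences : List String), Dom_get_segments_from_individual individual sentences → Spec_get_segments_from_individual individual sentences (get_segments_from_individual individual sentences)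

-- ===== LEMMAS AND PROOFS =====

-- slice of sentences between Nat positions a and b
def pvSl (sentences : List String) (a b : Nat) : List String := (sentences.drop a).take (b - a)

-- boundary indices of l starting at absolute index k
def pvBnd : List Int → Nat → List Nat
  | [], _ => []
  | i :: r, k => if i == 1 then k :: pvBnd r (k+1) else pvBnd r (k+1)

-- B's fold, Nat-indexed
def pvFoldB (sentences : List String) : List Nat → Nat → List (List String) → Nat × List (List String)
  | [], s, segs => (s, segs)
  | b :: bs, s, segs => pvFoldB sentences bs (b+1) (segs ++ [pvSl sentences s (b+1)])

theorem pvFoldB_le (sentences : List String) :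
    ∀ (l : List Int) (k s : Nat) (segs : List (List String)), s ≤ k →
      (pvFoldB sentences (pvBnd l k) s segs).1 ≤ k + l.length := by
  intro l
  induction l with
  | nil => intro k s segs h; simp [pvBnd, pvFoldB]; omega
  | cons i r ih =>
    intro k s segs h
    cases hib : (i == 1) with
    | true =>
      simp only [pvBnd, hib, if_true, pvFoldB, List.length_cons]
      have := ih (k+1) (k+1) (segs ++ [pvSl sentences s (k+1)]) (le_refl _)
      omega
    | false =>
      simp only [pvBnd, hib, Bool.false_eq_true, if_false, List.length_cons]
      have := ih (k+1) s segs (by omega)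
      omega

theorem pvSl_snoc (sentences : List String) (a b : Nat) (ha : a ≤ b) (hb : b < sentences.length) :
    pvSl sentences a b ++ [sentences.getD b ""] = pvSl sentences a (b+1) := by
  unfold pvSl
  have hgd : sentences.getD b "" = (sentences.drop a)[b - a]'(by simp; omega) := by
    rw [List.getD_eq_getElem sentences "" hb]
    simp [List.getElem_drop]
    congr 1; omega
  rw [hgd]
  rw [show b + 1 - a = (b - a) + 1 by omega]
  rw [List.take_succ_eq_append_getElem (by simp; omega)]

-- main invariant: A's fold over the zipped suffix equals B's slice-building fold over the boundaries
theorem pvMain (sentences : List String) :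
    ∀ (l : List Int) (k s : Nat) (segs : List (List String)),
      s ≤ k → k + l.length ≤ sentences.length →
      (l.zip ((List.range' k l.length).map Int.ofNat)).foldl
        (fun (st : List String × List (List String)) ij =>
          let temp := st.1 ++ [PySem.List.pyGetD sentences ij.2 ""]
          if ij.1 == 1 then ([], st.2 ++ [temp]) else (temp, st.2))
        (pvSl sentences s k, segs)
      = (pvSl sentences (pvFoldB sentences (pvBnd l k) s segs).1 (k + l.length),
         (pvFoldB sentences (pvBnd l k) s segs).2) := by
  intro l
  induction l with
  | nil => intro k s segs _ _; simp [pvBnd, pvFoldB]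
  | cons i r ih =>
    intro k s segs hs hlen
    have hk : k < sentences.length := by simp at hlen; omega
    have hget : PySem.List.pyGetD sentences (Int.ofNat k) "" = sentences.getD k "" := by
      simpa using PySem.List.pyGetD_natCast (xs := sentences) (n := k) (d := "")
    simp only [List.length_cons, List.range'_succ, List.map_cons, List.zip_cons_cons,
      List.foldl_cons]
    cases hib : (i == 1) with
    | true =>
      simp only [hib, if_true, hget, pvBnd, pvFoldB]
      rw [pvSl_snoc sentences s k hs hk]
      have hIH := ih (k+1) (k+1) (segs ++ [pvSl sentences s (k+1)]) (le_refl _)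
        (by simp at hlen ⊢; omega)
      have h0 : pvSl sentences (k+1) (k+1) = [] := by simp [pvSl]
      rw [h0] at hIH
      rw [hIH, show k + 1 + r.length = k + (r.length + 1) by omega]
    | false =>
      simp only [hib, Bool.false_eq_true, if_false, hget, pvBnd]
      rw [pvSl_snoc sentences s k hs hk]
      have hIH := ih (k+1) s segs (by omega) (by simp at hlen ⊢; omega)
      rw [hIH, show k + 1 + r.length = k + (r.length + 1) by omega]

-- B's Int-state fold equals the Nat-indexed pvFoldB
theorem pvFoldB_cast (sentences : List String) :
    ∀ (bs : List Nat) (s : Nat) (segs : List (List String)),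
      bs.foldl
        (fun (st : Int × List (List String)) (b : Nat) =>
          ((b : Int) + 1, st.2 ++ [PySem.List.slice sentences (some st.1) (some ((b : Int) + 1))]))
        ((s : Int), segs)
      = (((pvFoldB sentences bs s segs).1 : Int), (pvFoldB sentences bs s segs).2) := by
  intro bs
  induction bs with
  | nil => intro s segs; simp [pvFoldB]
  | cons b r ih =>
    intro s segs
    simp only [List.foldl_cons]
    have hsl : PySem.List.slice sentences (some (s : Int)) (some ((b : Int) + 1))
        = pvSl sentences s (b+1) := by
      rw [show ((b : Int) + 1) = ((b + 1 : Nat) : Int) by push_cast; ring]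
      exact PySem.List.slice_natCast (xs := sentences) (a := s) (b := b + 1)
    rw [hsl, show ((b : Int) + 1) = ((b + 1 : Nat) : Int) by push_cast; ring, ih (b+1)]
    simp [pvFoldB]

-- B's filter over range equals pvBnd
theorem pvFilt_eq (ind : List Int) :
    ∀ (l : List Int) (k : Nat),
      (∀ j, j < l.length → ind.getD (k + j) 0 = l.getD j 0) →
      (List.range' k l.length).filter (fun i => ind.getD i 0 == 1) = pvBnd l k := by
  intro l
  induction l with
  | nil => intro k _; simp [pvBnd]
  | cons i r ih =>
    intro k h
    have h0 : ind.getD k 0 = i := by simpa using h 0 (by simp)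
    simp only [List.length_cons, List.range'_succ, List.filter_cons, h0, pvBnd]
    rw [ih (k+1) (fun j hj => by
      have := h (j+1) (by simpa using Nat.succ_lt_succ hj)
      simpa [Nat.add_assoc, Nat.add_comm 1 j] using this)]

-- zip truncates to the shorter list
theorem pvZip_take {α β : Type} : ∀ (l : List α) (js : List β), l.zip js = (l.take js.length).zip js := by
  intro l
  induction l with
  | nil => intro js; simp
  | cons a r ih =>
    intro js
    cases js with
    | nil => simp
    | cons j js' => simp [List.zip_cons_cons, ih js']

theorem pvZip_take_right {α β : Type} : ∀ (l : List α) (js : List β), l.zip js = l.zip (js.take l.length) := by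
  intro l
  induction l with
  | nil => intro js; simp
  | cons a r ih =>
    intro js
    cases js with
    | nil => simp
    | cons j js' => simp [List.zip_cons_cons, ih js']

theorem pvDropLast_getLast (l : List String) (s : Nat) (hs : s < l.length) :
    (l.drop s).take (l.length - 1 - s) ++ [l.getLast (by intro h; simp [h] at hs)] = l.drop s := by
  have hne : l.drop s ≠ [] := by
    intro h
    have := congrArg List.length h
    simp at this; omega
  have hlen : (l.drop s).length - 1 = l.length - 1 - s := by simp; omega
  have hgl : l.getLast (by intro h; simp [h] at hs) = (l.drop s).getLast hne := by
    rw [List.getLast_eq_getElem, List.getLast_eq_getElem]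
    simp [List.getElem_drop]
    congr 1; omega
  rw [hgl, ← hlen, ← List.dropLast_eq_take, List.dropLast_append_getLast hne]

-- ===== VERDICT (by name: the statement is the Claim_ definition above) =====
theorem get_segments_from_individual_spec : Claim_equal_get_segments_from_individual := by
  intro individual sentences _
  unfold Spec_get_segments_from_individual
  unfold get_segments_from_individual get_segments_from_individual_alt
  set n₀ := sentences.length with hn₀
  set m := min individual.length n₀ with hm
  -- normalize A's zip to (take m) vs range' 0 m
  have hrange : PySem.List.pyRange 0 (n₀ : Int) 1 = (List.range' 0 n₀).map Int.ofNat := by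
    rw [PySem.List.pyRange_zero_natCast]
    simp [List.range_eq_range']
  have hzip : individual.zip (PySem.List.pyRange 0 (n₀ : Int) 1)
      = (individual.take m).zip ((List.range' 0 m).map Int.ofNat) := by
    rw [hrange]
    rcases le_total individual.length n₀ with h | h
    · rw [pvZip_take_right]
      have hm' : m = individual.length := by omega
      rw [hm', ← List.map_take, List.take_range'_of_length_ge h, pvZip_take]
      congr 1
      simp
    · rw [pvZip_take]
      have hm' : m = n₀ := by omega
      simp [hm']
  have hmlen : (individual.take m).length = m := by simp [hm]
  -- normalize B's boundaries
  have hfilt : (List.range' 0 m).filter (fun i => individual.getD i 0 == 1)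
      = pvBnd (individual.take m) 0 := by
    have h := pvFilt_eq individual (individual.take m) 0 (fun j hj => by
      rw [hmlen] at hj
      rw [Nat.zero_add,
          List.getD_eq_getElem _ _ (by omega : j < individual.length),
          List.getD_eq_getElem _ _ (by rw [hmlen]; omega)]
      simp)
    rw [hmlen] at h
    have htt : List.take (individual.take m).length individual = individual.take m := by
      rw [hmlen]
    simpa [htt] using h
  have hbrange : PySem.List.pyRange 0 (m : Int) 1 = (List.range' 0 m).map Int.ofNat := by
    rw [PySem.List.pyRange_zero_natCast]
    simp [List.range_eq_range']
  have hbfilt : (PySem.List.pyRange 0 (m : Int) 1).filter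
        (fun i => PySem.List.pyGetD individual i 0 == 1)
      = (pvBnd (individual.take m) 0).map Int.ofNat := by
    rw [hbrange, List.filter_map]
    have hcomp : ((fun i => PySem.List.pyGetD individual i 0 == 1) ∘ Int.ofNat)
        = fun i : Nat => individual.getD i 0 == 1 := by
      funext i
      simp [Function.comp, PySem.List.pyGetD_natCast]
    rw [hcomp, hfilt]
  -- rewrite both folds
  have hsl0 : pvSl sentences 0 0 = ([] : List String) := by simp [pvSl]
  have hA := pvMain sentences (individual.take m) 0 0 [] (le_refl 0)
    (by rw [hmlen]; omega)
  rw [hsl0, hmlen] at hA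
  set bs := pvBnd (individual.take m) 0 with hbs
  set r := pvFoldB sentences bs 0 [] with hr
  have hB : (bs.map Int.ofNat).foldl
      (fun (st : Int × List (List String)) b =>
        (b + 1, st.2 ++ [PySem.List.slice sentences (some st.1) (some (b + 1))]))
      ((0 : Int), ([] : List (List String)))
      = ((r.1 : Int), r.2) := by
    rw [List.foldl_map]
    exact_mod_cast pvFoldB_cast sentences bs 0 []
  simp only [hzip, hA, hbfilt, hB, Nat.zero_add]
  by_cases hc : n₀ = individual.length + 1
  · rw [if_pos (by simpa [← hn₀] using hc), if_pos (by simpa [← hn₀] using hc)]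
    have hm' : m = n₀ - 1 := by omega
    have hrle : r.1 ≤ m := by
      have h := pvFoldB_le sentences (individual.take m) 0 0 [] (le_refl 0)
      rw [← hbs, ← hr, hmlen] at h
      simpa using h
    have hn₀pos : 0 < n₀ := by omega
    have hne : sentences ≠ [] := by
      intro h; rw [h] at hn₀; simp [hn₀] at hn₀pos
    have hslast : PySem.List.slice sentences (some (r.1 : Int)) none = sentences.drop r.1 :=
      PySem.List.slice_from_natCast (xs := sentences) (a := r.1)
    rw [hslast, PySem.List.pyGetD_neg_one sentences "" hne]
    congr 1
    rw [← pvDropLast_getLast sentences r.1 (by omega)]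
    simp only [List.cons.injEq, and_true, List.append_cancel_right_eq]
    unfold pvSl
    congr 1
    omega
  · rw [if_neg (by simpa [← hn₀] using hc), if_neg (by simpa [← hn₀] using hc)]
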